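-- pv_equiv track=rewrite | github.com/Cla-Zh/knowledgeStor | knowledge_base/kb_builder/expert_identifier.py | _infer_domain_name
-- ===== SOURCE A (Python) =====
-- from typing import Any, Dict, List, Optional, Set, Tuple
--
-- DEFAULT_ENTITY_GROUPS = {
--     "person": {
--         "name": "人物领域",
--         "description": "涵盖人物相关知识：演员、政治家、运动员、科学家等",
--         "entity_types": ["person", "actor", "politician", "athlete", "scientist",
--                          "writer", "artist", "musician", "director"],
--         "keywords": ["born", "died", "career", "award", "education", "married",
--                      "children", "nationality", "occupation", "age"],
--     },
--     "location": {
--         "name": "地理领域",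
--         "description": "涵盖地理相关知识：城市、国家、地标、地区等",
--         "entity_types": ["location", "city", "country", "landmark", "region",
--                          "state", "continent", "island", "mountain", "river"],
--         "keywords": ["located", "capital", "population", "area", "border",
--                      "latitude", "longitude", "climate", "continent"],
--     },
--     "organization": {
--         "name": "组织领域",
--         "description": "涵盖组织相关知识：公司、大学、政府机构、团体等",
--         "entity_types": ["organization", "company", "university", "school",
--                          "government", "agency", "team", "club", "party"],
--         "keywords": ["founded", "headquarters", "CEO", "revenue", "employees",
--                      "member", "established", "president", "chairman"],
--     },
--     "work": {
--         "name": "作品领域",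
--         "description": "涵盖作品相关知识：电影、书籍、音乐、游戏等",
--         "entity_types": ["work", "film", "movie", "book", "novel", "album",
--                          "song", "show", "series", "game"],
--         "keywords": ["directed", "starring", "released", "published", "written",
--                      "produced", "genre", "award", "nominated", "rating"],
--     },
--     "event": {
--         "name": "事件领域",
--         "description": "涵盖事件相关知识：战争、选举、比赛、节日等",
--         "entity_types": ["event", "war", "battle", "election", "tournament",
--                          "championship", "festival", "ceremony"],
--         "keywords": ["occurred", "started", "ended", "participants", "winner",
--                      "result", "casualties", "location", "date"],
--     },
-- }
--
-- def _infer_domain_name(entity_types: List[str], keywords: List[str]) -> str: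
--     """
--     根据实体类型和关键词推断领域名称
--
--     Args:
--         entity_types: 实体类型列表
--         keywords: 关键词列表
--
--     Returns:
--         领域名称
--     """
--     if not entity_types:
--         # 从关键词推断
--         keyword_set = set(kw.lower() for kw in keywords[:10])
--         for group_id, group_info in DEFAULT_ENTITY_GROUPS.items():
--             group_kws = set(kw.lower() for kw in group_info["keywords"])
--             overlap = keyword_set & group_kws
--             if len(overlap) >= 2:
--                 return group_info["name"]
--         return "通用领域"
--
--     primary_type = entity_types[0].lower()
--
--     type_name_map = {
--         "person": "人物领域",
--         "location": "地理领域",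
--         "organization": "组织领域",
--         "work": "作品领域",
--         "event": "事件领域",
--         "date": "时间领域",
--         "number": "数值领域",
--     }
--
--     return type_name_map.get(primary_type, f"{primary_type}领域")
-- ===== SOURCE B (Python) =====
-- # B: inverted index + single counting pass over the deduped keywords (alternative decomposition).
-- DEFAULT_ENTITY_GROUPS = {
--     "person": {
--         "name": "人物领域",
--         "keywords": ["born", "died", "career", "award", "education", "married",
--                      "children", "nationality", "occupation", "age"],
--     },
--     "location": {
--         "name": "地理领域",
--         "keywords": ["located", "capital", "population", "area", "border",
--                      "latitude", "longitude", "climate", "continent"],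
--     },
--     "organization": {
--         "name": "组织领域",
--         "keywords": ["founded", "headquarters", "CEO", "revenue", "employees",
--                      "member", "established", "president", "chairman"],
--     },
--     "work": {
--         "name": "作品领域",
--         "keywords": ["directed", "starring", "released", "published", "written",
--                      "produced", "genre", "award", "nominated", "rating"],
--     },
--     "event": {
--         "name": "事件领域",
--         "keywords": ["occurred", "started", "ended", "participants", "winner",
--                      "result", "casualties", "location", "date"],
--     },
-- }
--
-- _TYPE_NAME_MAP = {
--     "person": "人物领域",
--     "location": "地理领域",
--     "organization": "组织领域",
--     "work": "作品领域",
--     "event": "事件领域",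
--     "date": "时间领域",
--     "number": "数值领域",
-- }
--
-- # inverted index: lowercased keyword -> list of group ids containing it (built once)
-- _KEYWORD_INDEX = {}
-- for _gid, _info in DEFAULT_ENTITY_GROUPS.items():
--     for _kw in _info["keywords"]:
--         _KEYWORD_INDEX.setdefault(_kw.lower(), []).append(_gid)
--
--
-- def _infer_domain_name(entity_types, keywords):
--     if entity_types:
--         primary_type = entity_types[0].lower()
--         return _TYPE_NAME_MAP.get(primary_type, f"{primary_type}领域")
--
--     counts = {}
--     for k in dict.fromkeys(kw.lower() for kw in keywords[:10]):
--         for gid in _KEYWORD_INDEX.get(k, []):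
--             counts[gid] = counts.get(gid, 0) + 1
--     for gid, info in DEFAULT_ENTITY_GROUPS.items():
--         if counts.get(gid, 0) >= 2:
--             return info["name"]
--     return "通用领域"
-- ===== Notes on version B (the rewrite author's own statement) =====
-- stated objective: alternative
-- what changed: The empty-entity_types branch now builds an inverted index (lowercased keyword -> group ids) once and does a single counting pass over the deduped first-10 lowercased keywords, instead of intersecting the keyword set with each group's keyword set; the first group (in original order) whose counter reaches 2 wins, the non-empty branch's dict lookup is unchanged.
import Mathlib
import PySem

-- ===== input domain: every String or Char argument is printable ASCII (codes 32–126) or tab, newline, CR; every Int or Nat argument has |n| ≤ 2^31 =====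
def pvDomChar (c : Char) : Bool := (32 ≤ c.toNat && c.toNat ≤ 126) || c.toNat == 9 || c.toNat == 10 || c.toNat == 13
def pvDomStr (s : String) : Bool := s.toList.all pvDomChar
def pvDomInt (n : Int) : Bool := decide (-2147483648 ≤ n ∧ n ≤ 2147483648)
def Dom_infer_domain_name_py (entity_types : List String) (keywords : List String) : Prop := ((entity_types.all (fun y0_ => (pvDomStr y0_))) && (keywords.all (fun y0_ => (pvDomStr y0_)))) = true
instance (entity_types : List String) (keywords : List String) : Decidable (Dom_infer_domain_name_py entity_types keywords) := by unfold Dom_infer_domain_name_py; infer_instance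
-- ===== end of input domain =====

-- B replaces A's per-group set intersections with an inverted keyword→groups index and one
-- counting pass over the deduped keywords (alternative decomposition; same results).

-- DEFAULT_ENTITY_GROUPS, reduced to the fields the function reads: (group_id, name, keywords)
def pvGroupsData : List (String × String × List String) :=
  [("person", "人物领域", ["born", "died", "career", "award", "education", "married", "children", "nationality", "occupation", "age"]),
   ("location", "地理领域", ["located", "capital", "population", "area", "border", "latitude", "longitude", "climate", "continent"]),
   ("organization", "组织领域", ["founded", "headquarters", "CEO", "revenue", "employees", "member", "established", "president", "chairman"]),
   ("work", "作品领域", ["directed", "starring", "released", "published", "written", "produced", "genre", "award", "nominated", "rating"]),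
   ("event", "事件领域", ["occurred", "started", "ended", "participants", "winner", "result", "casualties", "location", "date"])]

-- ===== PORT A =====
-- A's for-loop over DEFAULT_ENTITY_GROUPS.items() with early return
def pvAScan (kwset : PySem.Set String) : List (String × String × List String) → Option String
  | [] => none
  | (_gid, name, kws) :: rest =>
    let group_kws : PySem.Set String := PySem.Set.ofList (kws.map PySem.Str.lower)
    let overlap := PySem.Set.inter kwset group_kws
    if 2 ≤ overlap.length then some name else pvAScan kwset rest

def infer_domain_name_py (entity_types : List String) (keywords : List String) : String :=
  if entity_types.isEmpty then
    let keyword_set : PySem.Set String :=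
      PySem.Set.ofList ((PySem.List.slice keywords none (some 10)).map PySem.Str.lower)
    (pvAScan keyword_set pvGroupsData).getD "通用领域"
  else
    -- entity_types[0] is safe here: the branch guarantees the list is nonempty
    let primary_type := PySem.Str.lower (entity_types.headD "")
    let type_name_map : PySem.Dict String String :=
      PySem.Dict.ofList [("person", "人物领域"), ("location", "地理领域"), ("organization", "组织领域"),
                         ("work", "作品领域"), ("event", "事件领域"), ("date", "时间领域"), ("number", "数值领域")]
    (type_name_map.get? primary_type).getD (primary_type ++ "领域")

-- ===== PORT B =====
-- module-level inverted index: lowercased keyword -> list of group ids containing it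
def pvKeywordIndex : PySem.Dict String (List String) :=
  pvGroupsData.foldl (fun idx g =>
    g.2.2.foldl (fun idx kw =>
      idx.modify (PySem.Str.lower kw) [] (fun l => l ++ [g.1])) idx) PySem.Dict.empty

-- B's final scan: first group (in insertion order) whose counter reached 2
def pvBPick (counts : PySem.Dict String Int) : List (String × String × List String) → String
  | [] => "通用领域"
  | (gid, name, _kws) :: rest =>
    if 2 ≤ counts.getD gid 0 then name else pvBPick counts rest

def infer_domain_name_py_alt (entity_types : List String) (keywords : List String) : String :=
  if !entity_types.isEmpty then
    let primary_type := PySem.Str.lower (entity_types.headD "")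
    let type_name_map : PySem.Dict String String :=
      PySem.Dict.ofList [("person", "人物领域"), ("location", "地理领域"), ("organization", "组织领域"),
                         ("work", "作品领域"), ("event", "事件领域"), ("date", "时间领域"), ("number", "数值领域")]
    (type_name_map.get? primary_type).getD (primary_type ++ "领域")
  else
    let counts : PySem.Dict String Int :=
      (PySem.List.dedup ((PySem.List.slice keywords none (some 10)).map PySem.Str.lower)).foldl
        (fun c k => (pvKeywordIndex.getD k []).foldl (fun c gid => c.modify gid 0 (fun n => n + 1)) c)
        PySem.Dict.empty
    pvBPick counts pvGroupsData

-- ===== PRECONDITION & SPEC =====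
def Spec_infer_domain_name_py (entity_types : List String) (keywords : List String) (out : String) : Prop := out = infer_domain_name_py_alt entity_types keywords
instance (entity_types : List String) (keywords : List String) (out : String) : Decidable (Spec_infer_domain_name_py entity_types keywords out) := by unfold Spec_infer_domain_name_py; infer_instance

-- ===== CLAIM (what is proved, stated in full; the proofs are below) =====
def Claim_equal_infer_domain_name_py : Prop := ∀ (entity_types : List String) (keywords : List String), Dom_infer_domain_name_py entity_types keywords → Spec_infer_domain_name_py entity_types keywords (infer_domain_name_py entity_types keywords)

-- ===== LEMMAS AND PROOFS =====

-- the index, fully evaluated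
def pvIdxLit : List (String × List String) :=
  [("born", ["person"]), ("died", ["person"]), ("career", ["person"]), ("award", ["person", "work"]),
   ("education", ["person"]), ("married", ["person"]), ("children", ["person"]), ("nationality", ["person"]),
   ("occupation", ["person"]), ("age", ["person"]), ("located", ["location"]), ("capital", ["location"]),
   ("population", ["location"]), ("area", ["location"]), ("border", ["location"]), ("latitude", ["location"]),
   ("longitude", ["location"]), ("climate", ["location"]), ("continent", ["location"]), ("founded", ["organization"]),
   ("headquarters", ["organization"]), ("ceo", ["organization"]), ("revenue", ["organization"]),
   ("employees", ["organization"]), ("member", ["organization"]), ("established", ["organization"]),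
   ("president", ["organization"]), ("chairman", ["organization"]), ("directed", ["work"]), ("starring", ["work"]),
   ("released", ["work"]), ("published", ["work"]), ("written", ["work"]), ("produced", ["work"]),
   ("genre", ["work"]), ("nominated", ["work"]), ("rating", ["work"]), ("occurred", ["event"]),
   ("started", ["event"]), ("ended", ["event"]), ("participants", ["event"]), ("winner", ["event"]),
   ("result", ["event"]), ("casualties", ["event"]), ("location", ["event"]), ("date", ["event"])]

set_option maxRecDepth 100000 in
set_option maxHeartbeats 4000000 in
theorem pvKeywordIndex_eq : pvKeywordIndex = PySem.Dict.mk pvIdxLit := by rfl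

-- first-match lookup in an assoc list whose values count `g` correctly for their own key
theorem pvCountGetD (g : String) (gkws : List String) :
    ∀ (ps : List (String × List String)) (k : String),
      (∀ p ∈ ps, ((p.2.count g : Int)) = if p.1 ∈ gkws then 1 else 0) →
      (k ∈ gkws → k ∈ ps.map Prod.fst) →
      ((((PySem.Dict.mk ps).getD k []).count g : Int)) = if k ∈ gkws then 1 else 0
  | [], k, _h1, h2 => by
    rw [PySem.Dict.getD_eq_get?_getD]
    simp only [PySem.Dict.get?, List.find?_nil, Option.map_none, Option.getD_none,
      List.count_nil, Nat.cast_zero]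
    rw [if_neg (fun hk => by simpa using h2 hk)]
  | (a, v) :: ps, k, h1, h2 => by
    rw [PySem.Dict.getD_eq_get?_getD, PySem.Dict.get?_mk_cons]
    by_cases hak : a == k
    · rw [if_pos hak]
      have hk : a = k := by simpa using hak
      subst hk
      simpa only [Option.getD_some] using h1 (a, v) (by simp)
    · rw [if_neg hak, ← PySem.Dict.getD_eq_get?_getD]
      exact pvCountGetD g gkws ps k (fun p hp => h1 p (by simp [hp]))
        (fun hk => by
          rcases List.mem_cons.mp (h2 hk) with h | h
          · exact absurd (beq_iff_eq.mpr h.symm) hak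
          · exact h)

-- the counting loop of B, as a sum over the deduped keyword list
theorem pvCountsFold (ks : List String) (c : PySem.Dict String Int) (g : String) :
    (ks.foldl (fun c k => (pvKeywordIndex.getD k []).foldl (fun c gid => c.modify gid 0 (fun n => n + 1)) c) c).getD g 0
      = c.getD g 0 + (ks.map (fun k => (((pvKeywordIndex.getD k []).count g : Int)))).sum := by
  induction ks generalizing c with
  | nil => simp only [List.foldl_nil, List.map_nil, List.sum_nil, add_zero]
  | cons k t ih =>
    simp only [List.foldl_cons, List.map_cons, List.sum_cons, ih,
      PySem.Dict.getD_foldl_modify_add_one]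
    ring

-- per-group: count of gid in the index bucket of k = membership of k in that group's lowercased keywords
theorem pvIdx_person (k : String) : (((pvKeywordIndex.getD k []).count "person" : Int)) = if k ∈ ["born", "died", "career", "award", "education", "married", "children", "nationality", "occupation", "age"] then 1 else 0 := by
  rw [pvKeywordIndex_eq]
  have hsub : ∀ x ∈ ["born", "died", "career", "award", "education", "married", "children", "nationality", "occupation", "age"], x ∈ pvIdxLit.map Prod.fst := by decide
  exact pvCountGetD _ _ pvIdxLit k (by decide) (hsub k)

theorem pvIdx_location (k : String) : (((pvKeywordIndex.getD k []).count "location" : Int)) = if k ∈ ["located", "capital", "population", "area", "border", "latitude", "longitude", "climate", "continent"] then 1 else 0 := by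
  rw [pvKeywordIndex_eq]
  have hsub : ∀ x ∈ ["located", "capital", "population", "area", "border", "latitude", "longitude", "climate", "continent"], x ∈ pvIdxLit.map Prod.fst := by decide
  exact pvCountGetD _ _ pvIdxLit k (by decide) (hsub k)

theorem pvIdx_organization (k : String) : (((pvKeywordIndex.getD k []).count "organization" : Int)) = if k ∈ ["founded", "headquarters", "ceo", "revenue", "employees", "member", "established", "president", "chairman"] then 1 else 0 := by
  rw [pvKeywordIndex_eq]
  have hsub : ∀ x ∈ ["founded", "headquarters", "ceo", "revenue", "employees", "member", "established", "president", "chairman"], x ∈ pvIdxLit.map Prod.fst := by decide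
  exact pvCountGetD _ _ pvIdxLit k (by decide) (hsub k)

theorem pvIdx_work (k : String) : (((pvKeywordIndex.getD k []).count "work" : Int)) = if k ∈ ["directed", "starring", "released", "published", "written", "produced", "genre", "award", "nominated", "rating"] then 1 else 0 := by
  rw [pvKeywordIndex_eq]
  have hsub : ∀ x ∈ ["directed", "starring", "released", "published", "written", "produced", "genre", "award", "nominated", "rating"], x ∈ pvIdxLit.map Prod.fst := by decide
  exact pvCountGetD _ _ pvIdxLit k (by decide) (hsub k)

theorem pvIdx_event (k : String) : (((pvKeywordIndex.getD k []).count "event" : Int)) = if k ∈ ["occurred", "started", "ended", "participants", "winner", "result", "casualties", "location", "date"] then 1 else 0 := by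
  rw [pvKeywordIndex_eq]
  have hsub : ∀ x ∈ ["occurred", "started", "ended", "participants", "winner", "result", "casualties", "location", "date"], x ∈ pvIdxLit.map Prod.fst := by decide
  exact pvCountGetD _ _ pvIdxLit k (by decide) (hsub k)

-- a 0/1-sum over a Prop membership test is a countP
theorem pvSumIte (gkws ks : List String) :
    (ks.map (fun k => if k ∈ gkws then (1 : Int) else 0)).sum = (ks.countP (fun k => decide (k ∈ gkws)) : Int) := by
  induction ks with
  | nil => simp
  | cons k t ih =>
    by_cases h : k ∈ gkws <;> simp [h, ih] <;> ring

-- A's per-group condition as a countP over the deduped keyword set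
theorem pvInterLen (ks : List String) (lowG : List String) (h : PySem.Set.ofList lowG = lowG) :
    (PySem.Set.inter ks (PySem.Set.ofList lowG)).length = ks.countP (fun k => decide (k ∈ lowG)) := by
  rw [h, PySem.Set.inter, ← List.countP_eq_length_filter]
  refine List.countP_congr (fun k _ => ?_)
  simp [PySem.Set.contains_eq_listContains, List.contains_eq_mem]

-- bridge per group: B's counter condition ↔ A's overlap condition
theorem pvBridge (ks : List String) (gid : String) (lowG : List String)
    (hidx : ∀ k, (((pvKeywordIndex.getD k []).count gid : Int)) = if k ∈ lowG then 1 else 0)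
    (hnd : PySem.Set.ofList lowG = lowG) :
    (2 ≤ (ks.foldl (fun c k => (pvKeywordIndex.getD k []).foldl (fun c gid => c.modify gid 0 (fun n => n + 1)) c) (PySem.Dict.empty : PySem.Dict String Int)).getD gid 0)
      ↔ (2 ≤ (PySem.Set.inter ks (PySem.Set.ofList lowG)).length) := by
  rw [pvCountsFold ks PySem.Dict.empty gid, pvInterLen ks lowG hnd]
  have : (ks.map (fun k => (((pvKeywordIndex.getD k []).count gid : Int)))).sum
      = (ks.countP (fun k => decide (k ∈ lowG)) : Int) := by
    rw [← pvSumIte]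
    exact congrArg List.sum (List.map_congr_left (fun k _ => hidx k))
  rw [this]
  simp only [PySem.Dict.getD_empty]
  omega

-- ===== VERDICT (by name: the statement is the Claim_ definition above) =====
theorem infer_domain_name_py_spec : Claim_equal_infer_domain_name_py := by
  intro entity_types keywords _hdom
  unfold Spec_infer_domain_name_py infer_domain_name_py infer_domain_name_py_alt
  cases entity_types with
  | cons h t => simp
  | nil =>
    rw [if_pos (show (List.isEmpty ([] : List String)) = true from rfl),
        if_neg (show ¬ ((!List.isEmpty ([] : List String)) = true) from by simp)]
    simp only [PySem.List.dedup]
    have e1 : List.map PySem.Str.lower ["born", "died", "career", "award", "education", "married", "children", "nationality", "occupation", "age"] = ["born", "died", "career", "award", "education", "married", "children", "nationality", "occupation", "age"] := by rfl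
    have e2 : List.map PySem.Str.lower ["located", "capital", "population", "area", "border", "latitude", "longitude", "climate", "continent"] = ["located", "capital", "population", "area", "border", "latitude", "longitude", "climate", "continent"] := by rfl
    have e3 : List.map PySem.Str.lower ["founded", "headquarters", "CEO", "revenue", "employees", "member", "established", "president", "chairman"] = ["founded", "headquarters", "ceo", "revenue", "employees", "member", "established", "president", "chairman"] := by rfl
    have e4 : List.map PySem.Str.lower ["directed", "starring", "released", "published", "written", "produced", "genre", "award", "nominated", "rating"] = ["directed", "starring", "released", "published", "written", "produced", "genre", "award", "nominated", "rating"] := by rfl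
    have e5 : List.map PySem.Str.lower ["occurred", "started", "ended", "participants", "winner", "result", "casualties", "location", "date"] = ["occurred", "started", "ended", "participants", "winner", "result", "casualties", "location", "date"] := by rfl
    set ks : List String := PySem.Set.ofList ((PySem.List.slice keywords none (some 10)).map PySem.Str.lower) with hks
    have h1 := (pvBridge ks "person" _ pvIdx_person (by rfl))
    have h2 := (pvBridge ks "location" _ pvIdx_location (by rfl))
    have h3 := (pvBridge ks "organization" _ pvIdx_organization (by rfl))
    have h4 := (pvBridge ks "work" _ pvIdx_work (by rfl))
    have h5 := (pvBridge ks "event" _ pvIdx_event (by rfl))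
    simp only [pvGroupsData, pvAScan, pvBPick, e1, e2, e3, e4, e5, h1, h2, h3, h4, h5]
    split_ifs <;> rfl
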